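-- pv_equiv track=rewrite | github.com/jcraig949jfi/Prometheus | cartography/shared/scripts/v2/scaling_law_peak.py | detrend_primes
-- ===== SOURCE A (Python) =====
-- def detrend_primes(terms):
--     """Remove factors of 2,3,5,7,11,13 from each term."""
--     out = []
--     for t in terms:
--         if t == 0:
--             out.append(0)
--             continue
--         v = abs(t)
--         for p in [2, 3, 5, 7, 11, 13]:
--             while v % p == 0 and v > 0:
--                 v //= p
--         out.append(v * (1 if t > 0 else -1))
--     return out
-- ===== SOURCE B (Python) =====
-- def _gcd(a, b):
--     while b:
--         a, b = b, a % b
--     return a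
--
--
-- def detrend_primes(terms):
--     """Remove factors of 2,3,5,7,11,13 from each term (gcd-based)."""
--     K = 30030  # 2*3*5*7*11*13
--     out = []
--     for t in terms:
--         if t == 0:
--             out.append(0)
--             continue
--         v = abs(t)
--         g = _gcd(v, K)
--         while g != 1:
--             v //= g
--             g = _gcd(v, K)
--         out.append(v if t > 0 else -v)
--     return out
-- ===== Notes on version B (the rewrite author's own statement) =====
-- stated objective: alternative
-- what changed: Replaces the per-prime trial-division inner loops with a repeated gcd reduction against K=30030: each gcd pass divides out one power of every small prime present, so the prime-list scan disappears.
import Mathlib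
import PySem

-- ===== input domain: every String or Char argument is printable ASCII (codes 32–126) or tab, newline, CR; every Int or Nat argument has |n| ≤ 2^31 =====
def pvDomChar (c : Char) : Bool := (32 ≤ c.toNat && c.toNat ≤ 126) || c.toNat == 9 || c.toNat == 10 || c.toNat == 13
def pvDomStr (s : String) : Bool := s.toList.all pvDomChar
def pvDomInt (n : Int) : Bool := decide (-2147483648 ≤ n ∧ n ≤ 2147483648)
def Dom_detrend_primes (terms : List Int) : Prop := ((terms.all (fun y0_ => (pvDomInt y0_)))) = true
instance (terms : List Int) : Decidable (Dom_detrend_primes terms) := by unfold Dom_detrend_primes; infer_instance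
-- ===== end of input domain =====

-- B replaces A's per-prime trial-division inner loops by repeated gcd reduction
-- against K = 30030 = 2*3*5*7*11*13 (objective: alternative algorithm, same cost).

-- ===== PORT A =====
-- inner `while v % p == 0 and v > 0: v //= p`; the `2 ≤ p` conjunct is a
-- totality guard only (every call site passes p from [2,3,5,7,11,13])
def pvStrip (p v : Nat) : Nat :=
  if h : 2 ≤ p ∧ v % p = 0 ∧ 0 < v then pvStrip p (v / p) else v
termination_by v
decreasing_by exact Nat.div_lt_self h.2.2 (by omega)

def detrend_primes (terms : List Int) : List Int :=
  terms.foldl (fun out t =>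
    if t = 0 then out ++ [0]
    else
      let v := [2, 3, 5, 7, 11, 13].foldl (fun v p => pvStrip p v) t.natAbs
      out ++ [(v : Int) * (if 0 < t then 1 else -1)]) []

-- ===== PORT B =====
-- Source B's hand-written Euclid loop `while b: a, b = b, a % b`
def pvGcd (a b : Nat) : Nat :=
  if b ≠ 0 then pvGcd b (a % b) else a
termination_by b
decreasing_by exact Nat.mod_lt _ (by omega)

-- needed by pvGcdLoop's termination proof (cited in decreasing_by)
theorem pvGcd_eq (a b : Nat) : pvGcd a b = Nat.gcd a b := by
  induction b using Nat.strong_induction_on generalizing a with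
  | _ b ih =>
    rw [pvGcd]
    by_cases hb : b = 0
    · simp [hb]
    · rw [if_pos hb, ih (a % b) (Nat.mod_lt _ (Nat.pos_of_ne_zero hb)),
        Nat.gcd_comm a b, Nat.gcd_rec b a, Nat.gcd_comm (a % b) b]

-- `while g != 1: v //= g; g = gcd(v, K)`; the `v ≠ 0` conjunct is a totality
-- guard only (v ≥ 1 at every call site and after every division)
def pvGcdLoop (v : Nat) : Nat :=
  if h : pvGcd v 30030 ≠ 1 ∧ v ≠ 0 then pvGcdLoop (v / pvGcd v 30030) else v
termination_by v
decreasing_by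
  have hg : pvGcd v 30030 = Nat.gcd v 30030 := pvGcd_eq v 30030
  have hpos : 0 < Nat.gcd v 30030 := Nat.gcd_pos_of_pos_right _ (by norm_num)
  exact Nat.div_lt_self (Nat.pos_of_ne_zero h.2) (by omega)

def detrend_primes_alt (terms : List Int) : List Int :=
  terms.foldl (fun out t =>
    if t = 0 then out ++ [0]
    else
      let v := pvGcdLoop t.natAbs
      out ++ [if 0 < t then (v : Int) else -(v : Int)]) []

-- ===== PRECONDITION & SPEC =====
def Spec_detrend_primes (terms : List Int) (out : List Int) : Prop := out = detrend_primes_alt terms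
instance (terms : List Int) (out : List Int) : Decidable (Spec_detrend_primes terms out) := by unfold Spec_detrend_primes; infer_instance

-- ===== CLAIM (what is proved, stated in full; the proofs are below) =====
def Claim_equal_detrend_primes : Prop := ∀ (terms : List Int), Dom_detrend_primes terms → Spec_detrend_primes terms (detrend_primes terms)

-- ===== LEMMAS AND PROOFS =====

-- r is the largest divisor of v coprime to K = 30030 (the common characterisation)
def pvGoodK (v r : Nat) : Prop :=
  r ∣ v ∧ Nat.Coprime r 30030 ∧ ∀ e, e ∣ v → Nat.Coprime e 30030 → e ∣ r

theorem pvGoodK_unique {v r₁ r₂ : Nat} (h₁ : pvGoodK v r₁) (h₂ : pvGoodK v r₂) : r₁ = r₂ :=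
  Nat.dvd_antisymm (h₂.2.2 r₁ h₁.1 h₁.2.1) (h₁.2.2 r₂ h₂.1 h₂.2.1)

theorem pvStrip_dvd (p v : Nat) : pvStrip p v ∣ v := by
  induction v using Nat.strong_induction_on with
  | _ v ih =>
    rw [pvStrip]
    split
    · next h =>
      have hpv : p ∣ v := Nat.dvd_of_mod_eq_zero h.2.1
      exact (ih (v / p) (Nat.div_lt_self h.2.2 (by omega))).trans (Nat.div_dvd_of_dvd hpv)
    · exact dvd_refl v

theorem pvStrip_pos (p : Nat) {v : Nat} (hv : 0 < v) : 0 < pvStrip p v := by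
  induction v using Nat.strong_induction_on with
  | _ v ih =>
    rw [pvStrip]
    split
    · next h =>
      have hpv : p ∣ v := Nat.dvd_of_mod_eq_zero h.2.1
      exact ih (v / p) (Nat.div_lt_self h.2.2 (by omega))
        (Nat.div_pos (Nat.le_of_dvd h.2.2 hpv) (by omega))
    · exact hv

theorem pvStrip_not_dvd {p : Nat} (hp : p.Prime) {v : Nat} (hv : 0 < v) :
    ¬ p ∣ pvStrip p v := by
  induction v using Nat.strong_induction_on with
  | _ v ih =>
    rw [pvStrip]
    split
    · next h =>
      have hpv : p ∣ v := Nat.dvd_of_mod_eq_zero h.2.1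
      exact ih (v / p) (Nat.div_lt_self h.2.2 (by omega))
        (Nat.div_pos (Nat.le_of_dvd h.2.2 hpv) (by omega))
    · next h =>
      intro hd
      exact h ⟨hp.two_le, Nat.mod_eq_zero_of_dvd hd, hv⟩

theorem pvStrip_dvd_mono {p : Nat} (hp : p.Prime) {v e : Nat}
    (he : e ∣ v) (hpe : ¬ p ∣ e) : e ∣ pvStrip p v := by
  induction v using Nat.strong_induction_on with
  | _ v ih =>
    rw [pvStrip]
    split
    · next h =>
      have hpv : p ∣ v := Nat.dvd_of_mod_eq_zero h.2.1
      have hce : Nat.Coprime e p := ((hp.coprime_iff_not_dvd).mpr hpe).symm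
      have he' : e ∣ (v / p) * p := by
        rw [Nat.div_mul_cancel hpv]; exact he
      exact ih (v / p) (Nat.div_lt_self h.2.2 (by omega)) (hce.dvd_of_dvd_mul_right he')
    · exact he

theorem not_dvd_of_coprime {p e : Nat} (hp : 2 ≤ p) (h : Nat.Coprime e p) : ¬ p ∣ e := by
  intro hd
  have := Nat.Coprime.eq_one_of_dvd h.symm hd
  omega

-- the fold over the prime list computes a divisor of v not divisible by any listed
-- prime, maximal among divisors avoiding all listed primes
theorem pvFold_inv (ps : List Nat) (hps : ∀ p ∈ ps, p.Prime) (v : Nat) (hv : 0 < v) :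
    (ps.foldl (fun v p => pvStrip p v) v) ∣ v ∧
    (∀ p ∈ ps, ¬ p ∣ ps.foldl (fun v p => pvStrip p v) v) ∧
    (∀ e, e ∣ v → (∀ p ∈ ps, ¬ p ∣ e) → e ∣ ps.foldl (fun v p => pvStrip p v) v) := by
  induction ps generalizing v with
  | nil => exact ⟨dvd_refl v, by simp, fun e he _ => he⟩
  | cons p ps ih =>
    have hp : p.Prime := hps p (by simp)
    have hw : 0 < pvStrip p v := pvStrip_pos p hv
    have hwd : pvStrip p v ∣ v := pvStrip_dvd p v
    have hpw : ¬ p ∣ pvStrip p v := pvStrip_not_dvd hp hv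
    obtain ⟨h1, h2, h3⟩ := ih (fun q hq => hps q (by simp [hq])) (pvStrip p v) hw
    refine ⟨h1.trans hwd, ?_, ?_⟩
    · intro q hq
      rcases List.mem_cons.mp hq with rfl | hq'
      · exact fun hd => hpw (hd.trans h1)
      · exact h2 q hq'
    · intro e he hne
      exact h3 e (pvStrip_dvd_mono hp he (hne p (by simp)))
        (fun q hq => hne q (by simp [hq]))

theorem pvFold_goodK {v : Nat} (hv : 0 < v) :
    pvGoodK v ([2, 3, 5, 7, 11, 13].foldl (fun v p => pvStrip p v) v) := by
  have hps : ∀ p ∈ [2, 3, 5, 7, 11, 13], Nat.Prime p := by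
    intro p hp; fin_cases hp <;> norm_num
  obtain ⟨h1, h2, h3⟩ := pvFold_inv [2, 3, 5, 7, 11, 13] hps v hv
  set r := [2, 3, 5, 7, 11, 13].foldl (fun v p => pvStrip p v) v with hr
  refine ⟨h1, ?_, ?_⟩
  · have cop : ∀ p ∈ [2, 3, 5, 7, 11, 13], Nat.Coprime r p := by
      intro p hp
      exact ((( hps p hp).coprime_iff_not_dvd).mpr (h2 p hp)).symm
    have : (30030 : Nat) = 2 * 3 * 5 * 7 * 11 * 13 := by norm_num
    rw [Nat.Coprime, this]
    exact Nat.Coprime.mul_right (Nat.Coprime.mul_right (Nat.Coprime.mul_right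
      (Nat.Coprime.mul_right (Nat.Coprime.mul_right
        (cop 2 (by simp)) (cop 3 (by simp))) (cop 5 (by simp)))
        (cop 7 (by simp))) (cop 11 (by simp))) (cop 13 (by simp))
  · intro e he hce
    refine h3 e he ?_
    intro p hp
    have hpd : p ∣ 30030 := by fin_cases hp <;> norm_num
    exact not_dvd_of_coprime (hps p hp).two_le (hce.coprime_dvd_right hpd)

theorem pvGcdLoop_goodK {v : Nat} (hv : 0 < v) : pvGoodK v (pvGcdLoop v) := by
  induction v using Nat.strong_induction_on with
  | _ v ih =>
    rw [pvGcdLoop]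
    simp only [pvGcd_eq]
    split
    · next h =>
      have hg1 : Nat.gcd v 30030 ≠ 1 := h.1
      have hgd : Nat.gcd v 30030 ∣ v := Nat.gcd_dvd_left v 30030
      have hgpos : 0 < Nat.gcd v 30030 := Nat.gcd_pos_of_pos_right _ (by norm_num)
      have hg2 : 1 < Nat.gcd v 30030 := by omega
      have hqpos : 0 < v / Nat.gcd v 30030 :=
        Nat.div_pos (Nat.le_of_dvd hv hgd) hgpos
      have hqlt : v / Nat.gcd v 30030 < v := Nat.div_lt_self hv hg2
      obtain ⟨h1, h2, h3⟩ := ih (v / Nat.gcd v 30030) hqlt hqpos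
      refine ⟨h1.trans (Nat.div_dvd_of_dvd hgd), h2, ?_⟩
      intro e he hce
      have hceg : Nat.Coprime e (Nat.gcd v 30030) :=
        hce.coprime_dvd_right (Nat.gcd_dvd_right v 30030)
      have he' : e ∣ (v / Nat.gcd v 30030) * Nat.gcd v 30030 := by
        rw [Nat.div_mul_cancel hgd]; exact he
      exact h3 e (hceg.dvd_of_dvd_mul_right he') hce
    · next h =>
      have hg1 : Nat.gcd v 30030 = 1 := by
        by_contra hne
        exact h ⟨hne, by omega⟩
      exact ⟨dvd_refl v, hg1, fun e he _ => he⟩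

theorem pvTerm_eq {t : Int} (ht : t ≠ 0) :
    ([2, 3, 5, 7, 11, 13].foldl (fun v p => pvStrip p v) t.natAbs) = pvGcdLoop t.natAbs := by
  have hv : 0 < t.natAbs := Int.natAbs_pos.mpr ht
  exact pvGoodK_unique (pvFold_goodK hv) (pvGcdLoop_goodK hv)

-- ===== VERDICT (by name: the statement is the Claim_ definition above) =====
theorem detrend_primes_spec : Claim_equal_detrend_primes := by
  intro terms _
  unfold Spec_detrend_primes detrend_primes detrend_primes_alt
  congr 1
  funext out t
  by_cases ht : t = 0
  · simp [ht]
  · simp only [if_neg ht, pvTerm_eq ht]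
    congr 1
    by_cases hpos : 0 < t <;> simp [hpos]
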